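-- pv_equiv track=rewrite | github.com/renaudll/omtk | scripts/omtk/vendor/omtk_compound/core/_utils_namespace.py | get_common_namespace
-- ===== SOURCE A (Python) =====
-- def get_namespace(value):
--     """ Get a namespace from an arbitrary value_.
--
--     :param object value: A value to extract a namespace from
--     :return: A namespace
--     :rtype: str
--     """
--     # TODO: Deprecate this, we should alway use strings.
--     def _get(value_):
--         # type: (object) -> str
--         try:
--             return value_.namespace()
--         except Exception:  # pylint: disable=broad-except
--             pass
--
--         try:
--             return value_.namespace
--         except AttributeError:
--             pass
--
--         return value_.rsplit(":", 1)[0] if ":" in value_ else ":"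
--
--     namespace = _get(value)
--     namespace = ":" + namespace.rstrip(":")
--     return namespace
--
-- def get_common_namespace(nodes):
--     """
--     Get the namespace of all provided nodes and find their common parent.
--     It no parent is found, the root namespace is returned.
--
--     :param List[object] nodes: List of objects having a namespace.
--     :return: A common namespace.
--     :rtype n
--     """
--     common_namespaces = None
--     # TODO: Validate
--     for node in nodes:
--         namespace = get_namespace(node)
--         if namespace:
--             tokens = namespace.split(":")
--             possibilities = {":".join(tokens[: i + 1]) for i in range(len(tokens))}
--             if not common_namespaces:
--                 common_namespaces = possibilities
--             else:
--                 common_namespaces &= possibilities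
--
--     if common_namespaces:
--         return sorted(common_namespaces)[-1].strip(":") or None
--     return None
-- ===== SOURCE B (Python) =====
-- def _namespace_tokens(node):
--     """Token list of the node's namespace string.
--
--     Exact namespace normalisation of A: part before the last ':' (or ':' if
--     none), right-stripped of ':', prefixed with ':', then split on ':'.
--     """
--     ns = node.rsplit(":", 1)[0] if ":" in node else ":"
--     return (":" + ns.rstrip(":")).split(":")
--
--
-- def get_common_namespace(nodes):
--     common = None
--     for node in nodes:
--         tokens = _namespace_tokens(node)
--         if common is None:
--             common = tokens
--         else:
--             i = 0
--             n = min(len(common), len(tokens))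
--             while i < n and common[i] == tokens[i]:
--                 i += 1
--             del common[i:]
--     if common is None:
--         return None
--     return ":".join(common).strip(":") or None
-- ===== Notes on version B (the rewrite author's own statement) =====
-- stated objective: faster
-- what changed: Replaces per-node prefix-set construction, set intersection and final sort with an incremental token-wise common-prefix truncation of a single token list.
import Mathlib
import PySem

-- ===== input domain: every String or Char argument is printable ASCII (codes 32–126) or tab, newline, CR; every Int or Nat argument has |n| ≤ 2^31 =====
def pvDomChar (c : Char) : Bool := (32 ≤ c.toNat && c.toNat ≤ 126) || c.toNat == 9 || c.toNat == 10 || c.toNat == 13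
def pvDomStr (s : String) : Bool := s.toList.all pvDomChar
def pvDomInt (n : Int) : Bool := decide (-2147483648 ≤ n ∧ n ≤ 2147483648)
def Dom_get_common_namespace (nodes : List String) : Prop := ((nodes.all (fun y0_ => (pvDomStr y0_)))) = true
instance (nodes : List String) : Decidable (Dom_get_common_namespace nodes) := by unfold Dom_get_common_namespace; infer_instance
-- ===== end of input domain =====

-- B replaces A's per-node prefix-set construction, set intersection and final sort by an
-- incremental token-wise common-prefix truncation (same return value; asymptotically less work).

-- ===== PORT A =====

-- exact port of s.rstrip(":") : drop trailing ':' characters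
def pvRstripColon (s : List Char) : List Char :=
  (List.dropWhile (fun c => c == ':') s.reverse).reverse

-- exact port of s.rsplit(":", 1)[0] on the guarded branch (':' occurs in s):
-- everything strictly before the LAST ':'
def pvRsplitHead (s : List Char) : List Char :=
  ((List.dropWhile (fun c => c != ':') s.reverse).tail).reverse

-- port of get_namespace for str arguments (the two try-blocks always fall through on str)
def get_namespace (value : String) : List Char :=
  let ns := if PySem.Chars.isIn [':'] value.toList then pvRsplitHead value.toList else [':']
  ':' :: pvRstripColon ns          -- ":" + ns.rstrip(":")

-- {":".join(tokens[: i + 1]) for i in range(len(tokens))}  (i ranges over 0 ≤ i < len: slice = take)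
def pvPossibilities (tokens : List (List Char)) : PySem.Set (List Char) :=
  PySem.Set.ofList ((List.range tokens.length).map
    (fun i => PySem.Chars.join [':'] (tokens.take (i + 1))))

-- one iteration of A's for-loop
def pvStepA (common : Option (PySem.Set (List Char))) (node : String) :
    Option (PySem.Set (List Char)) :=
  let ns := get_namespace node
  if ns ≠ [] then                                   -- if namespace:
    let tokens := PySem.Chars.splitOn ns [':']
    let possibilities := pvPossibilities tokens
    match common with                               -- if not common_namespaces: … else: &=
    | none => some possibilities
    | some s => if s = [] then some possibilities else some (PySem.Set.inter s possibilities)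
  else common

def get_common_namespace (nodes : List String) : Option String :=
  match nodes.foldl pvStepA none with
  | none => none
  | some s =>
    if s ≠ [] then                                  -- if common_namespaces:
      match PySem.List.pyGet? (PySem.List.sorted s (fun x => x)) (-1) with
      | none => none                                -- unreachable: s ≠ []
      | some best =>
        let r := PySem.Chars.stripChars best [':']  -- .strip(":")
        if r ≠ [] then some (String.ofList r) else none -- … or None
    else none

-- ===== PORT B =====

-- B's helper _namespace_tokens
def pvNamespaceTokens (node : String) : List (List Char) :=
  let ns := if PySem.Chars.isIn [':'] node.toList then pvRsplitHead node.toList else [':']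
  PySem.Chars.splitOn (':' :: pvRstripColon ns) [':']

-- B's truncation loop: common prefix of the two token lists
def pvCommonPrefix : List (List Char) → List (List Char) → List (List Char)
  | a :: as, b :: bs => if a = b then a :: pvCommonPrefix as bs else []
  | _, _ => []

def pvStepB (c : Option (List (List Char))) (node : String) : Option (List (List Char)) :=
  match c with
  | none => some (pvNamespaceTokens node)
  | some ts => some (pvCommonPrefix ts (pvNamespaceTokens node))

def get_common_namespace_alt (nodes : List String) : Option String :=
  match nodes.foldl pvStepB none with
  | none => none
  | some ts =>
    let r := PySem.Chars.stripChars (PySem.Chars.join [':'] ts) [':']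
    if r ≠ [] then some (String.ofList r) else none

-- ===== PRECONDITION & SPEC =====
def Spec_get_common_namespace (nodes : List String) (out : Option String) : Prop := out = get_common_namespace_alt nodes
instance (nodes : List String) (out : Option String) : Decidable (Spec_get_common_namespace nodes out) := by unfold Spec_get_common_namespace; infer_instance

-- ===== CLAIM (what is proved, stated in full; the proofs are below) =====
def Claim_equal_get_common_namespace : Prop := ∀ (nodes : List String), Dom_get_common_namespace nodes → Spec_get_common_namespace nodes (get_common_namespace nodes)

-- ===== LEMMAS AND PROOFS =====

-- token lists produced by the loops: first token empty, no token contains ':'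
def pvGood (ts : List (List Char)) : Prop :=
  ts.head? = some [] ∧ ∀ t ∈ ts, ':' ∉ t

-- the list of prefix-joins, in increasing length order
def pvJoins (ts : List (List Char)) : List (List Char) :=
  (List.range ts.length).map (fun i => PySem.Chars.join [':'] (ts.take (i + 1)))

lemma pvSplitOn_go_eq (c : Char) : ∀ (fuel : Nat) (l cur : List Char) (acc : List (List Char)),
    l.length ≤ fuel →
    PySem.Chars.splitOn.go [c] fuel l cur acc
      = acc.reverse ++ (List.splitOn c l).modifyHead (cur.reverse ++ ·) := by
  intro fuel
  induction fuel with
  | zero =>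
    intro l cur acc h
    have : l = [] := List.eq_nil_of_length_eq_zero (Nat.le_zero.mp h)
    subst this
    simp [PySem.Chars.splitOn.go, List.splitOn]
  | succ n ih =>
    intro l cur acc h
    cases l with
    | nil => simp [PySem.Chars.splitOn.go, List.splitOn]
    | cons a rest =>
      have hrest : rest.length ≤ n := by simpa using h
      by_cases hc : c = a
      · subst hc
        rw [PySem.Chars.splitOn.go]
        simp only [List.isPrefixOf, BEq.rfl, Bool.true_and, List.isPrefixOf_nil_left, if_pos,
          List.length_singleton, List.drop_one, List.tail_cons]
        rw [ih rest [] (cur.reverse :: acc) hrest]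
        obtain ⟨hd, tl, hsp⟩ := List.exists_cons_of_ne_nil (List.splitOnP_ne_nil (· == c) rest)
        simp [List.splitOn, List.splitOnP_cons, hsp]
      · rw [PySem.Chars.splitOn.go]
        have hbeq : ([c].isPrefixOf (a :: rest)) = false := by
          simp [List.isPrefixOf]; exact hc
        rw [hbeq]
        simp only [Bool.false_eq_true, if_false]
        rw [ih rest (a :: cur) acc hrest]
        obtain ⟨hd, tl, hsp⟩ := List.exists_cons_of_ne_nil (List.splitOnP_ne_nil (· == c) rest)
        have hac : (a == c) = false := by simp; exact fun hh => hc hh.symm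
        simp [List.splitOn, List.splitOnP_cons, hsp, hac]

lemma pvSplitOn_eq (c : Char) (s : List Char) :
    PySem.Chars.splitOn s [c] = List.splitOn c s := by
  rw [PySem.Chars.splitOn, pvSplitOn_go_eq c (s.length + 1) s [] [] (by omega)]
  obtain ⟨hd, tl, hsp⟩ := List.exists_cons_of_ne_nil (List.splitOnP_ne_nil (· == c) s)
  simp [List.splitOn] at hsp ⊢
  simp [hsp]

lemma pvSplitOn_free (c : Char) (l : List Char) : ∀ t ∈ List.splitOn c l, c ∉ t := by
  induction l with
  | nil => simp [List.splitOn]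
  | cons a rest ih =>
    by_cases hc : a = c
    · subst hc
      simp only [List.splitOn, List.splitOnP_cons, BEq.rfl, if_pos]
      intro t ht
      rcases List.mem_cons.mp ht with h | h
      · subst h; simp
      · exact ih t h
    · have hac : (a == c) = false := by simp [hc]
      obtain ⟨hd, tl, hsp⟩ := List.exists_cons_of_ne_nil (List.splitOnP_ne_nil (· == c) rest)
      simp only [List.splitOn, List.splitOnP_cons, hac, Bool.false_eq_true, if_false] at *
      rw [hsp]
      intro t ht
      rcases List.mem_cons.mp ht with h | h
      · subst h
        have := ih hd (by rw [hsp]; exact List.mem_cons_self)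
        simp [Ne.symm hc] at this ⊢
        exact fun hh => this hh
      · exact ih t (by rw [hsp]; exact List.mem_cons_of_mem _ h)

lemma pvGood_tokens (x : List Char) :
    (PySem.Chars.splitOn (':' :: x) [':']).head? = some [] ∧
      ∀ t ∈ PySem.Chars.splitOn (':' :: x) [':'], ':' ∉ t := by
  rw [pvSplitOn_eq]
  constructor
  · simp [List.splitOn, List.splitOnP_cons]
  · exact pvSplitOn_free ':' _

lemma pvJoin_inj (as bs : List (List Char)) (ha : as ≠ []) (hb : bs ≠ [])
    (ha' : ∀ t ∈ as, ':' ∉ t) (hb' : ∀ t ∈ bs, ':' ∉ t)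
    (h : PySem.Chars.join [':'] as = PySem.Chars.join [':'] bs) : as = bs := by
  have h1 := List.splitOn_intercalate as ':' ha' ha
  have h2 := List.splitOn_intercalate bs ':' hb' hb
  simp only [PySem.Chars.join] at h
  rw [← h1, ← h2, h]

lemma pvCP_le_iff (ts : List (List Char)) : ∀ (us : List (List Char)) (m : Nat),
    m ≤ (pvCommonPrefix ts us).length ↔
      m ≤ ts.length ∧ m ≤ us.length ∧ ts.take m = us.take m := by
  induction ts with
  | nil =>
    intro us m; simp only [pvCommonPrefix, List.length_nil, Nat.le_zero, List.take_nil]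
    constructor
    · intro hm; subst hm; simp
    · rintro ⟨hm, -, -⟩; omega
  | cons a as ih =>
    intro us m
    cases us with
    | nil =>
      simp only [pvCommonPrefix, List.length_nil, Nat.le_zero, List.take_nil]
      constructor
      · intro hm; subst hm; simp
      · rintro ⟨-, hm, -⟩; omega
    | cons b bs =>
      by_cases hab : a = b
      · subst hab
        cases m with
        | zero => simp
        | succ k =>
          simp only [pvCommonPrefix, if_true, List.length_cons, Nat.succ_le_succ_iff,
            List.take_succ_cons, List.cons.injEq, true_and]
          exact ih bs k
      · simp only [pvCommonPrefix, if_neg hab]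
        cases m with
        | zero => simp
        | succ k =>
          simp only [List.length_nil, List.take_succ_cons, List.cons.injEq]
          constructor
          · omega
          · rintro ⟨-, -, hh, -⟩; exact absurd hh hab

lemma pvCP_eq_take (ts : List (List Char)) : ∀ us : List (List Char),
    pvCommonPrefix ts us = ts.take (pvCommonPrefix ts us).length := by
  induction ts with
  | nil => intro us; simp [pvCommonPrefix]
  | cons a as ih =>
    intro us
    cases us with
    | nil => simp [pvCommonPrefix]
    | cons b bs =>
      by_cases hab : a = b
      · simp only [pvCommonPrefix, if_pos hab, List.length_cons, List.take_succ_cons,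
          List.cons.injEq, true_and]
        exact ih bs
      · simp [pvCommonPrefix, if_neg hab]

lemma pvLt_append (l r : List Char) (h : r ≠ []) : l < l ++ r := by
  induction l with
  | nil => cases r with
    | nil => exact absurd rfl h
    | cons a t => exact List.Lex.nil
  | cons a t ih => exact List.Lex.cons ih

lemma pvJoin_append (xs : List (List Char)) : ∀ (ys : List (List Char)), xs ≠ [] → ys ≠ [] →
    PySem.Chars.join [':'] (xs ++ ys)
      = PySem.Chars.join [':'] xs ++ [':'] ++ PySem.Chars.join [':'] ys := by
  induction xs with
  | nil => intro ys h; exact absurd rfl h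
  | cons a as ih =>
    intro ys _ hy
    cases as with
    | nil =>
      cases ys with
      | nil => exact absurd rfl hy
      | cons b bs =>
        rw [List.singleton_append, PySem.Chars.join_cons_cons, PySem.Chars.join_singleton]
    | cons a2 as2 =>
      rw [show (a :: a2 :: as2) ++ ys = a :: ((a2 :: as2) ++ ys) from rfl]
      rw [show (a2 :: as2) ++ ys = a2 :: (as2 ++ ys) from rfl, PySem.Chars.join_cons_cons]
      rw [show a2 :: (as2 ++ ys) = (a2 :: as2) ++ ys from rfl, ih ys (by simp) hy,
        PySem.Chars.join_cons_cons]
      simp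

lemma pvJoin_take_lt (ts : List (List Char)) (i j : Nat) (hij : i < j) (hj : j < ts.length) :
    PySem.Chars.join [':'] (ts.take (i + 1)) < PySem.Chars.join [':'] (ts.take (j + 1)) := by
  have hsplit : ts.take (j + 1) = ts.take (i + 1) ++ ((ts.drop (i + 1)).take (j - i)) := by
    rw [show j + 1 = (i + 1) + (j - i) by omega, List.take_add]
  rw [hsplit]
  have hne : (ts.drop (i + 1)).take (j - i) ≠ [] := by
    intro he
    rcases List.take_eq_nil_iff.mp he with h | h
    · omega
    · have := congrArg List.length h
      simp only [List.length_drop, List.length_nil] at this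
      omega
  have h1 : ts.take (i + 1) ≠ [] := by
    intro he
    rcases List.take_eq_nil_iff.mp he with h | h
    · omega
    · subst h; simp at hj
  rw [pvJoin_append _ _ h1 hne, List.append_assoc]
  exact pvLt_append _ _ (by simp)

lemma pvJoins_pairwise (ts : List (List Char)) : (pvJoins ts).Pairwise (· < ·) := by
  unfold pvJoins
  rw [List.pairwise_map]
  refine List.Pairwise.imp_of_mem ?_ (List.pairwise_lt_range)
  intro i j hi hj hij
  exact pvJoin_take_lt ts i j hij (List.mem_range.mp hj)

lemma pvJoins_nodup (ts : List (List Char)) : (pvJoins ts).Nodup :=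
  (pvJoins_pairwise ts).imp (fun h => ne_of_lt h)

lemma pvPoss_eq_joins (ts : List (List Char)) : pvPossibilities ts = pvJoins ts := by
  have h := PySem.Set.update_eq_append_of_disjoint (PySem.Set.empty) (pvJoins ts)
    (pvJoins_nodup ts) (by intro x hx; simp [PySem.Set.empty])
  unfold pvPossibilities
  have : PySem.Set.ofList (pvJoins ts) = PySem.Set.update PySem.Set.empty (pvJoins ts) := rfl
  rw [show ((List.range ts.length).map (fun i => PySem.Chars.join [':'] (ts.take (i + 1))))
      = pvJoins ts from rfl, this, h]
  simp [PySem.Set.empty]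

lemma pvMem_joins (ts us : List (List Char)) (hts1 : ts.head? = some [])
    (hus1 : us.head? = some []) (hts2 : ∀ t ∈ ts, ':' ∉ t) (hus2 : ∀ t ∈ us, ':' ∉ t)
    (i : Nat) (hi : i < ts.length) :
    PySem.Chars.join [':'] (ts.take (i + 1)) ∈ pvJoins us
      ↔ i + 1 ≤ (pvCommonPrefix ts us).length := by
  constructor
  · intro hmem
    simp only [pvJoins, List.mem_map, List.mem_range] at hmem
    obtain ⟨j, hj, heq⟩ := hmem
    have htne : ts.take (i + 1) ≠ [] := by
      intro he
      rcases List.take_eq_nil_iff.mp he with h | h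
      · omega
      · subst h; simp at hi
    have hune : us.take (j + 1) ≠ [] := by
      intro he
      rcases List.take_eq_nil_iff.mp he with h | h
      · omega
      · subst h; simp at hj
    have htake : ts.take (i + 1) = us.take (j + 1) :=
      pvJoin_inj _ _ htne hune
        (fun t ht => hts2 t (List.mem_of_mem_take ht))
        (fun t ht => hus2 t (List.mem_of_mem_take ht)) heq.symm
    have hl := congrArg List.length htake
    simp only [List.length_take] at hl
    have hi1 : min (i + 1) ts.length = i + 1 := by omega
    rw [hi1] at hl
    have hjus : i + 1 ≤ us.length := by omega
    have hij1 : i + 1 ≤ j + 1 := by omega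
    have htake2 : ts.take (i + 1) = us.take (i + 1) := by
      have : us.take (i + 1) = (us.take (j + 1)).take (i + 1) := by
        rw [List.take_take]; congr 1; omega
      rw [this, ← htake, List.take_take]
      congr 1; omega
    exact (pvCP_le_iff ts us (i + 1)).mpr ⟨by omega, hjus, htake2⟩
  · intro hk
    obtain ⟨hts, hus, htake⟩ := (pvCP_le_iff ts us (i + 1)).mp hk
    simp only [pvJoins, List.mem_map, List.mem_range]
    exact ⟨i, by omega, by rw [← htake]⟩

lemma pvFilter_range (n k : Nat) (h : k ≤ n) :
    (List.range n).filter (fun i => decide (i < k)) = List.range k := by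
  induction n with
  | zero => have : k = 0 := by omega
            subst this; rfl
  | succ m ih =>
    rw [List.range_succ, List.filter_append]
    by_cases hk : k ≤ m
    · rw [ih hk]
      have : (List.filter (fun i => decide (i < k)) [m]) = [] := by
        simp; omega
      rw [this, List.append_nil]
    · have hk1 : k = m + 1 := by omega
      subst hk1
      rw [List.filter_eq_self.mpr (by intro a ha; simp at ha ⊢; omega)]
      simp [List.range_succ]

lemma pvGood_cp (ts us : List (List Char)) (hts1 : ts.head? = some [])
    (hus1 : us.head? = some []) (hts2 : ∀ t ∈ ts, ':' ∉ t) :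
    (pvCommonPrefix ts us).head? = some [] ∧ ∀ t ∈ pvCommonPrefix ts us, ':' ∉ t := by
  constructor
  · cases ts with
    | nil => simp at hts1
    | cons a ts' =>
      cases us with
      | nil => simp at hus1
      | cons b us' =>
        simp at hts1 hus1
        subst hts1; subst hus1
        simp [pvCommonPrefix]
  · intro t ht
    rw [pvCP_eq_take ts us] at ht
    exact hts2 t (List.mem_of_mem_take ht)

lemma pvInter_poss (ts us : List (List Char)) (hts1 : ts.head? = some [])
    (hus1 : us.head? = some []) (hts2 : ∀ t ∈ ts, ':' ∉ t) (hus2 : ∀ t ∈ us, ':' ∉ t) :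
    PySem.Set.inter (pvPossibilities ts) (pvPossibilities us)
      = pvPossibilities (pvCommonPrefix ts us) := by
  rw [pvPoss_eq_joins ts, pvPoss_eq_joins us, pvPoss_eq_joins (pvCommonPrefix ts us)]
  show List.filter (fun x => (pvJoins us).contains x) (pvJoins ts) = pvJoins (pvCommonPrefix ts us)
  set k := (pvCommonPrefix ts us).length with hkdef
  have hkn : k ≤ ts.length := by
    have := (pvCP_le_iff ts us k).mp (le_refl k)
    omega
  conv_lhs => rw [show pvJoins ts
    = (List.range ts.length).map (fun i => PySem.Chars.join [':'] (ts.take (i + 1))) from rfl]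
  rw [List.filter_map]
  have hcongr : List.filter
      ((fun x => (pvJoins us).contains x) ∘ (fun i => PySem.Chars.join [':'] (ts.take (i + 1))))
      (List.range ts.length)
      = List.filter (fun i => decide (i < k)) (List.range ts.length) := by
    apply List.filter_congr
    intro i hi
    simp only [Function.comp_apply]
    have := pvMem_joins ts us hts1 hus1 hts2 hus2 i (List.mem_range.mp hi)
    simp only [List.contains_eq_mem, decide_eq_decide]
    rw [this]
    omega
  rw [hcongr, pvFilter_range _ _ hkn]
  rw [show pvJoins (pvCommonPrefix ts us)
    = (List.range k).map (fun i => PySem.Chars.join [':'] ((pvCommonPrefix ts us).take (i + 1))) from rfl]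
  apply List.map_congr_left
  intro i hi
  have hik : i + 1 ≤ k := List.mem_range.mp hi
  congr 1
  rw [pvCP_eq_take ts us, List.take_take]
  congr 1
  omega

lemma pvTokens_eq (node : String) :
    pvNamespaceTokens node = PySem.Chars.splitOn (get_namespace node) [':'] := rfl

lemma pvGood_ne_nil (ts : List (List Char)) (h : pvGood ts) : ts ≠ [] := by
  intro he; rw [he] at h; simp [pvGood] at h

lemma pvPoss_ne_nil (ts : List (List Char)) (h : pvGood ts) : pvPossibilities ts ≠ [] := by
  rw [pvPoss_eq_joins]
  intro he
  have := congrArg List.length he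
  simp [pvJoins] at this
  exact pvGood_ne_nil ts h this

lemma pvNs_eq_cons (node : String) :
    get_namespace node
      = ':' :: pvRstripColon (if PySem.Chars.isIn [':'] node.toList
          then pvRsplitHead node.toList else [':']) := rfl

lemma pvGood_tokens' (node : String) : pvGood (pvNamespaceTokens node) := by
  rw [pvTokens_eq, pvNs_eq_cons]
  exact pvGood_tokens _

-- the loop invariant: A's running set is exactly the possibility set of B's token list
lemma pvLoop (nodes : List String) : ∀ (ts : List (List Char)), pvGood ts →
    ∃ ts', pvGood ts' ∧ nodes.foldl pvStepB (some ts) = some ts' ∧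
      nodes.foldl pvStepA (some (pvPossibilities ts)) = some (pvPossibilities ts') := by
  induction nodes with
  | nil => intro ts h; exact ⟨ts, h, rfl, rfl⟩
  | cons node rest ih =>
    intro ts h
    have htok : pvGood (pvNamespaceTokens node) := pvGood_tokens' node
    have hcp : pvGood (pvCommonPrefix ts (pvNamespaceTokens node)) := by
      unfold pvGood at h htok ⊢
      exact pvGood_cp ts (pvNamespaceTokens node) h.1 htok.1 h.2
    have hstepB : pvStepB (some ts) node = some (pvCommonPrefix ts (pvNamespaceTokens node)) := rfl
    have hstepA : pvStepA (some (pvPossibilities ts)) node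
        = some (pvPossibilities (pvCommonPrefix ts (pvNamespaceTokens node))) := by
      unfold pvStepA
      rw [if_pos (show get_namespace node ≠ [] by
        rw [pvNs_eq_cons]; exact List.cons_ne_nil _ _)]
      show (if pvPossibilities ts = []
          then some (pvPossibilities (PySem.Chars.splitOn (get_namespace node) [':']))
          else some (PySem.Set.inter (pvPossibilities ts)
            (pvPossibilities (PySem.Chars.splitOn (get_namespace node) [':']))))
        = some (pvPossibilities (pvCommonPrefix ts (pvNamespaceTokens node)))
      rw [if_neg (pvPoss_ne_nil ts h), ← pvTokens_eq]
      unfold pvGood at h htok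
      rw [pvInter_poss ts (pvNamespaceTokens node) h.1 htok.1 h.2 htok.2]
    rw [List.foldl_cons, List.foldl_cons, hstepB, hstepA]
    exact ih _ hcp

-- final extraction: sorted(possibilities)[-1] is the full join of the token list
lemma pvFinal (ts : List (List Char)) (h : pvGood ts) :
    PySem.List.pyGet? (PySem.List.sorted (pvPossibilities ts) (fun x => x)) (-1)
      = some (PySem.Chars.join [':'] ts) := by
  have hsorted : PySem.List.sorted (pvPossibilities ts) (fun x => x) = pvPossibilities ts := by
    have hp : (pvPossibilities ts).Pairwise (· < ·) := by
      rw [pvPoss_eq_joins]; exact pvJoins_pairwise ts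
    have hdec : (fun (a b : List Char) => a.decidableLT b)
        = (LinearOrder.toDecidableLT (α := List Char)) := by
      funext a b; exact Subsingleton.elim _ _
    rw [hdec]
    exact PySem.List.sorted_eq_of_perm_of_pairwise_lt _ _ _ (List.Perm.refl _) hp
  rw [hsorted, pvPoss_eq_joins]
  have hn : 0 < ts.length := by
    cases ts with
    | nil => exact absurd rfl (pvGood_ne_nil [] h)
    | cons a l => simp
  have hlen : (pvJoins ts).length = ts.length := by simp [pvJoins]
  rw [PySem.List.pyGet?]
  rw [PySem.List.pyIdx?]
  rw [if_neg (by omega), if_pos (by simp [hlen]; omega)]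
  simp only [Option.bind_some, hlen]
  have : (-(-1 : Int)).toNat = 1 := rfl
  rw [this]
  unfold pvJoins
  rw [List.getElem?_map]
  rw [List.getElem?_range (by omega)]
  simp only [Option.map_some]
  congr 2
  rw [show ts.length - 1 + 1 = ts.length by omega]
  exact List.take_length

-- ===== VERDICT (by name: the statement is the Claim_ definition above) =====
theorem get_common_namespace_spec : Claim_equal_get_common_namespace := by
  intro nodes _
  unfold Spec_get_common_namespace
  cases nodes with
  | nil => rfl
  | cons node rest =>
    unfold get_common_namespace get_common_namespace_alt
    rw [List.foldl_cons, List.foldl_cons]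
    have hB : pvStepB none node = some (pvNamespaceTokens node) := rfl
    have hA : pvStepA none node = some (pvPossibilities (pvNamespaceTokens node)) := by
      unfold pvStepA
      rw [if_pos (by rw [pvNs_eq_cons]; exact List.cons_ne_nil _ _)]
      rw [← pvTokens_eq]
    rw [hA, hB]
    obtain ⟨ts', hgood, hfB, hfA⟩ := pvLoop rest (pvNamespaceTokens node) (pvGood_tokens' node)
    rw [hfA, hfB]
    simp only
    rw [if_pos (pvPoss_ne_nil ts' hgood)]
    rw [pvFinal ts' hgood]
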